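-- pv_equiv track=rewrite | github.com/alxwen711/contestSubmissionArchive | advent/2023/part 3/14.py | hset
-- ===== SOURCE A (Python) =====
-- def hset(br):
--     m = 10089886811898868001
--     v = 0
--     for a in br:
--         for b in a:
--             v *= 5
--             if b == ".": v += 1
--             elif b == "O": v += 2
--             else: v += 3
--         v = v % m
--     return v
-- ===== SOURCE B (Python) =====
-- def hset(br):
--     m = 10089886811898868001
--     DIG = {".": "1", "O": "2"}
--     v = 0
--     for row in br:
--         digits = "".join(DIG.get(c, "3") for c in row)
--         rowval = int(digits, 5) if digits else 0
--         v = (v * 5 ** len(row) + rowval) % m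
--     return v
-- ===== Notes on version B (the rewrite author's own statement) =====
-- stated objective: alternative
-- what changed: Replaces A's single carried char-by-char Horner accumulation with a per-row decomposition: each row is mapped to base-5 digits and parsed as one base-5 integer, which is then spliced onto the running hash via v = (v*5**len(row) + rowval) % m.
import Mathlib
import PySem

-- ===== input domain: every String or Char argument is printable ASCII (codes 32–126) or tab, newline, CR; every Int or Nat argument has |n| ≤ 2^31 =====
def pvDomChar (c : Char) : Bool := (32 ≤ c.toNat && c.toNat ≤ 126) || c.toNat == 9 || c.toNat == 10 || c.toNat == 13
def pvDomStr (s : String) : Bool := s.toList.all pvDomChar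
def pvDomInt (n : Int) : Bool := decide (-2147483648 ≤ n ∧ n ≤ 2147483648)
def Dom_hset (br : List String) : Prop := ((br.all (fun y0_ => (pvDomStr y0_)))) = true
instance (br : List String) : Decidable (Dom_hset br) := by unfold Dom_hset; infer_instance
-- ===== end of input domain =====

-- B replaces A's carried char-by-char Horner accumulation with a per-row "map to base-5
-- digits, parse the row as one base-5 integer, splice it onto the hash" decomposition
-- (objective: alternative; same cost, provably the same value).

-- ===== PORT A =====
-- literal port of A: one carried accumulator over all characters, reduced mod m after each row
def hset (br : List String) : Int :=
  br.foldl
    (fun v a =>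
      PySem.Int.mod
        (a.toList.foldl
          (fun v b =>
            let v := v * 5
            if b = '.' then v + 1 else if b = 'O' then v + 2 else v + 3)
          v)
        10089886811898868001)
    0

-- ===== PORT B =====
-- Source B: DIG.get(c, "3") as a digit map, then int(digits, 5) as a base-5 parse of the mapped digits
def hsetAltDigit (c : Char) : Int := if c = '.' then 1 else if c = 'O' then 2 else 3

def hsetAltParse (ds : List Int) : Int := ds.foldl (fun acc d => acc * 5 + d) 0

def hset_alt (br : List String) : Int :=
  br.foldl
    (fun v row =>
      let rowval := hsetAltParse (row.toList.map hsetAltDigit)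
      PySem.Int.mod (v * 5 ^ row.toList.length + rowval) 10089886811898868001)
    0

-- ===== PRECONDITION & SPEC =====
def Spec_hset (br : List String) (out : Int) : Prop := out = hset_alt br
instance (br : List String) (out : Int) : Decidable (Spec_hset br out) := by unfold Spec_hset; infer_instance

-- ===== CLAIM (what is proved, stated in full; the proofs are below) =====
def Claim_equal_hset : Prop := ∀ (br : List String), Dom_hset br → Spec_hset br (hset br)

-- ===== LEMMAS AND PROOFS =====

-- the base-5 parse started at v equals v shifted by the length plus the parse started at 0
lemma hset_horner_shift (l : List Int) (v : Int) :
    l.foldl (fun acc d => acc * 5 + d) v = v * 5 ^ l.length + l.foldl (fun acc d => acc * 5 + d) 0 := by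
  induction l generalizing v with
  | nil => simp
  | cons d l ih =>
    simp only [List.foldl_cons, List.length_cons]
    rw [ih (v * 5 + d), ih (0 * 5 + d)]
    ring

-- A's inner per-character loop computes the base-5 parse of the digit-mapped row
lemma hset_inner_eq (l : List Char) (v : Int) :
    l.foldl
      (fun v b =>
        let v := v * 5
        if b = '.' then v + 1 else if b = 'O' then v + 2 else v + 3)
      v
    = (l.map hsetAltDigit).foldl (fun acc d => acc * 5 + d) v := by
  induction l generalizing v with
  | nil => rfl
  | cons c l ih =>
    simp only [List.foldl_cons, List.map_cons]
    rw [ih]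
    congr 1
    simp only [hsetAltDigit]
    split_ifs <;> ring

-- ===== VERDICT (by name: the statement is the Claim_ definition above) =====
-- A = B, with no domain hypothesis needed
lemma hset_eq (br : List String) : hset br = hset_alt br := by
  unfold hset hset_alt
  induction br using List.reverseRecOn with
  | nil => rfl
  | append_singleton l row ih =>
    simp only [List.foldl_append, List.foldl_cons, List.foldl_nil]
    rw [ih, hset_inner_eq, hset_horner_shift, List.length_map, hsetAltParse]

theorem hset_spec : Claim_equal_hset := by
  intro br _
  exact hset_eq br
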